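-- pv_equiv track=rewrite | github.com/thomasnormal/circt | utils/mutation_mcy/templates/native_create_mutated.py | build_code_mask
-- ===== SOURCE A (Python) =====
-- def build_code_mask(source: str):
--     mask = [True] * len(source)
--     state = "normal"
--     escape = False
--     i = 0
--     n = len(source)
--     while i < n:
--         ch = source[i]
--         if state == "normal":
--             if ch == "/" and i + 1 < n and source[i + 1] == "/":
--                 mask[i] = False
--                 mask[i + 1] = False
--                 i += 2
--                 state = "line_comment"
--                 continue
--             if ch == "/" and i + 1 < n and source[i + 1] == "*":
--                 mask[i] = False
--                 mask[i + 1] = False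
--                 i += 2
--                 state = "block_comment"
--                 continue
--             if ch == '"':
--                 mask[i] = False
--                 state = "string"
--                 escape = False
--                 i += 1
--                 continue
--             i += 1
--             continue
--         if state == "line_comment":
--             if ch != "\n":
--                 mask[i] = False
--             else:
--                 state = "normal"
--             i += 1
--             continue
--         if state == "block_comment":
--             mask[i] = False
--             if ch == "*" and i + 1 < n and source[i + 1] == "/":
--                 mask[i + 1] = False
--                 i += 2
--                 state = "normal"
--                 continue
--             i += 1
--             continue
--         if state == "string":
--             mask[i] = False
--             if escape:
--                 escape = False
--                 i += 1
--                 continue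
--             if ch == "\\":
--                 escape = True
--                 i += 1
--                 continue
--             if ch == '"':
--                 state = "normal"
--             i += 1
--             continue
--     return mask
-- ===== SOURCE B (Python) =====
-- def build_code_mask(source: str):
--     n = len(source)
--     mask = [True] * n
--     i = 0
--     while i < n:
--         ch = source[i]
--         if ch == "/" and source.startswith("//", i):
--             j = source.find("\n", i)
--             end = n if j == -1 else j
--             mask[i:end] = [False] * (end - i)
--             i = end
--         elif ch == "/" and source.startswith("/*", i):
--             j = source.find("*/", i + 2)
--             end = n if j == -1 else j + 2
--             mask[i:end] = [False] * (end - i)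
--             i = end
--         elif ch == '"':
--             j = i + 1
--             while j < n:
--                 if source[j] == "\\":
--                     j += 2
--                 elif source[j] == '"':
--                     j += 1
--                     break
--                 else:
--                     j += 1
--             end = min(j, n)
--             mask[i:end] = [False] * (end - i)
--             i = end
--         else:
--             i += 1
--     return mask
-- ===== Notes on version B (the rewrite author's own statement) =====
-- stated objective: alternative
-- what changed: B replaces A's per-character four-state loop by a region tokenizer: in normal code it jumps to the next line-comment, block-comment or string opener, computes the whole region's end with str.find or one inner scan, and blanks the span in a single slice assignment.
import Mathlib
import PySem

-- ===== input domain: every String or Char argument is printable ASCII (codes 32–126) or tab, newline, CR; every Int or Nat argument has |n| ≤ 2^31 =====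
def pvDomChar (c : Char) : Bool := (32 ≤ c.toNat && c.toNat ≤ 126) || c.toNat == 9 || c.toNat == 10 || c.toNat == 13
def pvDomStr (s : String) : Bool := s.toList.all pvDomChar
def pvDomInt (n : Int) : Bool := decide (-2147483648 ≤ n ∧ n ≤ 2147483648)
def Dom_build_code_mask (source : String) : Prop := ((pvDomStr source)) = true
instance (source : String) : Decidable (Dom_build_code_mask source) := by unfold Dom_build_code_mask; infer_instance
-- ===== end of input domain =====

-- B tokenizes whole comment/string regions at once (find/scan per region) instead of A's per-character state machine; objective: idiomatic/alternative, same cost.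


-- ===== PORT A =====
-- A's per-character while loop with the state variable; each branch of the Python
-- 'if' chain, in the same order, becomes a match arm emitting the mask bit(s) it sets.
inductive StA where
  | normal | line | block | str (escape : Bool)
deriving DecidableEq

def goA : List Char → StA → List Bool
  | [], _ => []
  | '/' :: '/' :: r, .normal => false :: false :: goA r .line
  | '/' :: '*' :: r, .normal => false :: false :: goA r .block
  | '"' :: r, .normal => false :: goA r (.str false)
  | _ :: r, .normal => true :: goA r .normal
  | c :: r, .line => if c = '\n' then true :: goA r .normal else false :: goA r .line
  | '*' :: '/' :: r, .block => false :: false :: goA r .normal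
  | _ :: r, .block => false :: goA r .block
  | c :: r, .str escape =>
      if escape then false :: goA r (.str false)
      else if c = '\\' then false :: goA r (.str true)
      else if c = '"' then false :: goA r .normal
      else false :: goA r (.str false)

def build_code_mask (source : String) : List Bool := goA source.toList .normal

-- ===== PORT B =====
-- B: region lengths computed up front.  source.find("\n", i) ↔ lineLen;
-- source.find("*/", i+2) (end = j+2 or n) ↔ blockLen; the inner string scan ↔ strLen.
def lineLen (l : List Char) : Nat := (l.takeWhile (· ≠ '\n')).length

def blockLen : List Char → Nat
  | [] => 0
  | '*' :: '/' :: _ => 2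
  | _ :: r => 1 + blockLen r

def strLen : List Char → Nat
  | [] => 0
  | '\\' :: [] => 1
  | '\\' :: _ :: r => 2 + strLen r
  | '"' :: _ => 1
  | _ :: r => 1 + strLen r

def goB : List Char → List Bool
  | [] => []
  | '/' :: '/' :: r =>
      false :: false :: (List.replicate (lineLen r) false ++ goB (r.drop (lineLen r)))
  | '/' :: '*' :: r =>
      false :: false :: (List.replicate (blockLen r) false ++ goB (r.drop (blockLen r)))
  | '"' :: r =>
      false :: (List.replicate (strLen r) false ++ goB (r.drop (strLen r)))
  | _ :: r => true :: goB r
termination_by l => l.length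
decreasing_by all_goals simp [List.length_drop]; try omega

def build_code_mask_alt (source : String) : List Bool := goB source.toList

-- ===== PRECONDITION & SPEC =====
def Spec_build_code_mask (source : String) (out : List Bool) : Prop := out = build_code_mask_alt source
instance (source : String) (out : List Bool) : Decidable (Spec_build_code_mask source out) := by unfold Spec_build_code_mask; infer_instance

-- ===== CLAIM (what is proved, stated in full; the proofs are below) =====
def Claim_equal_build_code_mask : Prop := ∀ (source : String), Dom_build_code_mask source → Spec_build_code_mask source (build_code_mask source)

-- ===== LEMMAS AND PROOFS =====

theorem goA_line (l : List Char) :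
    goA l .line = List.replicate (lineLen l) false ++ goA (l.drop (lineLen l)) .normal := by
  induction l with
  | nil => rfl
  | cons c r ih =>
      by_cases h : c = '\n'
      · subst h; simp [goA, lineLen, List.takeWhile]
      · have hl : lineLen (c :: r) = lineLen r + 1 := by
          simp [lineLen, h]
        have hstep : goA (c :: r) .line = false :: goA r .line := by simp [goA, h]
        rw [hstep, ih, hl]
        simp [List.replicate_succ, List.drop_succ_cons]

theorem goA_block (l : List Char) :
    goA l .block = List.replicate (blockLen l) false ++ goA (l.drop (blockLen l)) .normal := by
  induction l using blockLen.induct with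
  | case1 => rfl
  | case2 r => simp [goA, blockLen, List.replicate_succ]
  | case3 c r h ih =>
      have hstep : goA (c :: r) StA.block = false :: goA r StA.block := by
        rw [goA.eq_def]; split <;> simp_all
      have hlen : blockLen (c :: r) = 1 + blockLen r := by
        rw [blockLen.eq_def]; split <;> simp_all
      rw [hstep, ih, hlen, Nat.add_comm]
      simp [List.replicate_succ, List.drop_succ_cons]

theorem goA_str (l : List Char) :
    goA l (.str false) = List.replicate (strLen l) false ++ goA (l.drop (strLen l)) .normal := by
  induction l using strLen.induct with
  | case1 => rfl
  | case2 => rfl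
  | case3 c r ih =>
      have s1 : goA ('\\' :: c :: r) (StA.str false) = false :: goA (c :: r) (StA.str true) := rfl
      have s2 : goA (c :: r) (StA.str true) = false :: goA r (StA.str false) := by simp [goA]
      have hstep : goA ('\\' :: c :: r) (StA.str false) = false :: false :: goA r (StA.str false) := by
        rw [s1, s2]
      have hlen : strLen ('\\' :: c :: r) = strLen r + 1 + 1 := by
        rw [show strLen ('\\' :: c :: r) = 2 + strLen r from rfl]; omega
      rw [hstep, ih, hlen]
      simp [List.replicate_succ, List.drop_succ_cons]
  | case4 r => simp [goA, strLen]
  | case5 c r h1 h2 h3 ih =>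
      have hc1 : c ≠ '\\' := by
        intro hc; subst hc
        cases r with
        | nil => exact h1 rfl rfl
        | cons d r' => exact h2 d r' rfl rfl
      have hc2 : c ≠ '"' := by intro hc; exact h3 hc
      have hstep : goA (c :: r) (StA.str false) = false :: goA r (StA.str false) := by
        simp [goA, hc1, hc2]
      have hlen : strLen (c :: r) = strLen r + 1 := by
        rw [strLen.eq_def]; split <;> simp_all <;> omega
      rw [hstep, ih, hlen]
      simp [List.replicate_succ, List.drop_succ_cons]

theorem goA_eq_goB (l : List Char) : goA l .normal = goB l := by
  induction l using goB.induct with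
  | case1 => simp [goA, goB]
  | case2 r ih =>
      rw [show goA ('/' :: '/' :: r) .normal = false :: false :: goA r .line from rfl,
        goA_line, ih, goB]
  | case3 r ih =>
      rw [show goA ('/' :: '*' :: r) .normal = false :: false :: goA r .block from rfl,
        goA_block, ih, goB]
  | case4 r ih =>
      rw [show goA ('"' :: r) .normal = false :: goA r (.str false) from rfl,
        goA_str, ih, goB]
  | case5 c r h1 h2 h3 ih =>
      have hstep : goA (c :: r) StA.normal = true :: goA r StA.normal := by
        rw [goA.eq_def]; split <;> simp_all
      have hstepB : goB (c :: r) = true :: goB r := by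
        rw [goB.eq_def]; split <;> simp_all
      rw [hstep, hstepB, ih]

-- ===== VERDICT (by name: the statement is the Claim_ definition above) =====
theorem build_code_mask_spec : Claim_equal_build_code_mask := by
  intro source _
  unfold Spec_build_code_mask build_code_mask build_code_mask_alt
  exact goA_eq_goB _
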